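-- pv_equiv track=rewrite | github.com/JJOL/TEB-LAB-UPC-2026 | Lab4/qgram_filtering.py | build_qgram_index
-- ===== SOURCE A (Python) =====
-- def build_qgram_index(T, q):
--     """
--     Build a hash table index mapping q-grams to their positions in text T.
--
--     This index allows quick lookup of all positions where a given q-gram
--     occurs in the text, which is essential for the seed-and-verify strategy.
--
--     Args:
--         T: Text string
--         q: Length of q-grams
--
--     Returns:
--         Dictionary mapping q-grams to list of positions where they occur
--     """
--     index = {}
--     for i in range(len(T) - q + 1):
--         qgram = T[i:i+q]
--         if qgram not in index:
--             index[qgram] = []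
--         index[qgram].append(i)
--     return index
-- ===== SOURCE B (Python) =====
-- def build_qgram_index(T, q):
--     grams = [T[i:i+q] for i in range(len(T) - q + 1)]
--     index = {}
--     for g in dict.fromkeys(grams):
--         index[g] = [i for i, h in enumerate(grams) if h == g]
--     return index
-- ===== Notes on version B (the rewrite author's own statement) =====
-- stated objective: alternative
-- what changed: Replaces A's single-pass insert-or-append dict build with a group-by decomposition: materialise the list of all q-grams once, deduplicate it to get the distinct keys in first-occurrence order, and build each key's position list by a scan over the enumerated gram list.
import Mathlib
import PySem

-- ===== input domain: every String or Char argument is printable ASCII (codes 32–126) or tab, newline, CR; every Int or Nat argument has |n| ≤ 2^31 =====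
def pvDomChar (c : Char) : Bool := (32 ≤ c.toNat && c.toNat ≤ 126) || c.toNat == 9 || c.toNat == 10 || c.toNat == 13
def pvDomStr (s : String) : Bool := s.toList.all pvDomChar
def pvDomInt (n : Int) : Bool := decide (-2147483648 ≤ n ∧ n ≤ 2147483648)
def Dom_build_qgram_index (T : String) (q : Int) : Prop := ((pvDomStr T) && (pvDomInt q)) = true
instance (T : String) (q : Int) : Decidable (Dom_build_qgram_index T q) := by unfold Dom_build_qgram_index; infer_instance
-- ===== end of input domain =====

-- B replaces A's single-pass insert-or-append dict build with a group-by decomposition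
-- (dedup the gram list for the keys, then one scan per key for its position list); objective: alternative.

-- ===== PORT A =====
def build_qgram_index (T : String) (q : Int) : List (String × List Int) :=
  ((PySem.List.pyRange 0 (PySem.Str.len T - q + 1) 1).foldl
    (fun index i =>
      let qgram := PySem.Str.slice T (some i) (some (i + q))
      let index := if index.contains qgram then index else index.insert qgram ([] : List Int)
      index.modify qgram [] (fun l => l ++ [i]))
    PySem.Dict.empty).items

-- ===== PORT B =====
def build_qgram_index_alt (T : String) (q : Int) : List (String × List Int) :=
  let grams := (PySem.List.pyRange 0 (PySem.Str.len T - q + 1) 1).map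
      (fun i => PySem.Str.slice T (some i) (some (i + q)))
  ((PySem.List.dedup grams).foldl
    (fun index g =>
      index.insert g (((PySem.List.enumerate grams).filter (fun p => p.2 == g)).map (fun p => p.1)))
    PySem.Dict.empty).items

-- ===== PRECONDITION & SPEC =====
def Spec_build_qgram_index (T : String) (q : Int) (out : List (String × List Int)) : Prop := out = build_qgram_index_alt T q
instance (T : String) (q : Int) (out : List (String × List Int)) : Decidable (Spec_build_qgram_index T q out) := by unfold Spec_build_qgram_index; infer_instance

-- ===== CLAIM (what is proved, stated in full; the proofs are below) =====
def Claim_equal_build_qgram_index : Prop := ∀ (T : String) (q : Int), Dom_build_qgram_index T q → Spec_build_qgram_index T q (build_qgram_index T q)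

-- ===== LEMMAS AND PROOFS =====

-- A's "if absent, insert []; then append i" step is exactly Dict.modify with default [].
theorem pv_step_eq (d : PySem.Dict String (List Int)) (g : String) (i : Int) :
    ((if d.contains g then d else d.insert g ([] : List Int)).modify g [] (fun l => l ++ [i]))
      = d.modify g [] (fun l => l ++ [i]) := by
  by_cases h : d.contains g
  · simp [h]
  · have h' : d.contains g = false := by simpa using h
    simp only [h', Bool.false_eq_true, if_false]
    rw [PySem.Dict.modify, PySem.Dict.modify,
      PySem.Dict.getD_of_not_contains d ([] : List Int) h',
      PySem.Dict.getD_insert_self, PySem.Dict.insert_insert_self]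

-- enumerating a list mapped over a consecutive int range pairs each range element with its image
theorem pv_enum_map_pyRange (f : Int → String) :
    ∀ (m : Nat) (s : Int),
      PySem.List.enumerate ((PySem.List.pyRange s (s + m) 1).map f) s
        = (PySem.List.pyRange s (s + m) 1).map (fun i => (i, f i)) := by
  intro m
  induction m with
  | zero => intro s; rw [PySem.List.pyRange_one_eq_nil (by omega)]; rfl
  | succ k ih =>
    intro s
    rw [PySem.List.pyRange_one_cons (by push_cast; omega : s < s + ((k+1 : Nat) : Int))]
    have h1 : s + ((k+1 : Nat) : Int) = (s + 1) + (k : Nat) := by push_cast; omega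
    simp only [List.map_cons, PySem.List.enumerate_cons, h1, ih (s + 1)]

theorem pv_pyRange_toNat (e : Int) :
    PySem.List.pyRange 0 e 1 = PySem.List.pyRange 0 ((e.toNat : Int)) 1 := by
  by_cases h : e ≤ 0
  · rw [PySem.List.pyRange_one_eq_nil h, PySem.List.pyRange_one_eq_nil (by omega)]
  · congr 1; omega

-- B's per-key scan over the enumerated gram list equals the (gram, position)-pair filter
theorem pv_pos_eq (f : Int → String) (e : Int) (g : String) :
    ((PySem.List.enumerate (((PySem.List.pyRange 0 e 1).map f))).filter
        (fun p => p.2 == g)).map (fun p => p.1)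
      = (((PySem.List.pyRange 0 e 1).map (fun i => (f i, i))).filter
          (fun p => p.1 == g)).map (fun p => p.2) := by
  rw [pv_pyRange_toNat e]
  have h0 : PySem.List.pyRange 0 ((e.toNat : Int)) 1
      = PySem.List.pyRange 0 ((0 : Int) + (e.toNat : Int)) 1 := by rw [zero_add]
  rw [h0, pv_enum_map_pyRange f e.toNat 0]
  simp [List.filter_map, List.map_map, Function.comp_def]

-- the whole equivalence, generic in the gram function and range bound
theorem pv_main (f : Int → String) (e : Int) :
    ((PySem.List.pyRange 0 e 1).foldl
        (fun index i =>
          (if index.contains (f i) then index else index.insert (f i) ([] : List Int)).modify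
            (f i) [] (fun l => l ++ [i]))
        PySem.Dict.empty).items
      = ((PySem.List.dedup ((PySem.List.pyRange 0 e 1).map f)).foldl
          (fun index g =>
            index.insert g
              (((PySem.List.enumerate ((PySem.List.pyRange 0 e 1).map f)).filter
                  (fun p => p.2 == g)).map (fun p => p.1)))
          PySem.Dict.empty).items := by
  have hA : (PySem.List.pyRange 0 e 1).foldl
        (fun index i =>
          (if index.contains (f i) then index else index.insert (f i) ([] : List Int)).modify
            (f i) [] (fun l => l ++ [i]))
        PySem.Dict.empty
      = (PySem.List.pyRange 0 e 1).foldl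
          (fun index i => index.modify (f i) [] (fun l => l ++ [i])) PySem.Dict.empty :=
    PySem.List.foldl_congr_mem _ _ _ _ (fun acc x _ => pv_step_eq acc (f x) x)
  have hmap : ((PySem.List.pyRange 0 e 1).map (fun i => ((f i, i) : String × Int))).foldl
        (fun d p => d.modify p.1 [] (fun l => l ++ [p.2])) PySem.Dict.empty
      = (PySem.List.pyRange 0 e 1).foldl
          (fun index i => index.modify (f i) [] (fun l => l ++ [i])) PySem.Dict.empty :=
    List.foldl_map
  rw [hA, ← hmap]
  have hnd : (((PySem.List.pyRange 0 e 1).map (fun i => ((f i, i) : String × Int))).foldl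
      (fun d p => d.modify p.1 [] (fun l => l ++ [p.2])) PySem.Dict.empty).keys.Nodup := by
    exact PySem.Dict.nodup_keys_foldl_modify_key _ (fun (p : String × Int) => p.1) []
      (fun (_ : PySem.Dict String (List Int)) (p : String × Int) => fun l => l ++ [p.2]) PySem.Dict.empty (by simp [PySem.Dict.keys_empty])
  rw [PySem.Dict.items_eq_map_keys _ hnd ([] : List Int)]
  have hkeys : (((PySem.List.pyRange 0 e 1).map (fun i => ((f i, i) : String × Int))).foldl
      (fun d p => d.modify p.1 [] (fun l => l ++ [p.2])) PySem.Dict.empty).keys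
      = PySem.List.dedup ((PySem.List.pyRange 0 e 1).map f) := by
    rw [PySem.Dict.keys_foldl_modify_key _ (fun (p : String × Int) => p.1) [] (fun (_ : PySem.Dict String (List Int)) (p : String × Int) => fun l => l ++ [p.2])]
    simp [PySem.Dict.keys_empty, PySem.Set.update_nil_left, List.map_map, Function.comp_def]
  rw [hkeys]
  have hB : ((PySem.List.dedup ((PySem.List.pyRange 0 e 1).map f)).foldl
      (fun index g =>
        index.insert g
          (((PySem.List.enumerate ((PySem.List.pyRange 0 e 1).map f)).filter
              (fun p => p.2 == g)).map (fun p => p.1)))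
      PySem.Dict.empty).items
      = (PySem.List.dedup ((PySem.List.pyRange 0 e 1).map f)).map
          (fun g => (g, ((PySem.List.enumerate ((PySem.List.pyRange 0 e 1).map f)).filter
              (fun p => p.2 == g)).map (fun p => p.1))) := by
    have := PySem.Dict.items_foldl_insert_fresh
      (PySem.List.dedup ((PySem.List.pyRange 0 e 1).map f)) (fun g => g)
      (fun g => ((PySem.List.enumerate ((PySem.List.pyRange 0 e 1).map f)).filter
          (fun p => p.2 == g)).map (fun p => p.1))
      PySem.Dict.empty (fun a _ => PySem.Dict.contains_empty a)
      (by simp)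
    simpa using this
  rw [hB]
  apply List.map_congr_left
  intro g _
  rw [pv_pos_eq f e g]
  rw [PySem.Dict.getD_foldl_modify_append]
  simp [PySem.Dict.getD_empty]

-- ===== VERDICT (by name: the statement is the Claim_ definition above) =====
theorem build_qgram_index_spec : Claim_equal_build_qgram_index := by
  intro T q _
  show build_qgram_index T q = build_qgram_index_alt T q
  unfold build_qgram_index build_qgram_index_alt
  exact pv_main (fun i => PySem.Str.slice T (some i) (some (i + q))) (PySem.Str.len T - q + 1)
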